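-- pv_equiv track=rewrite | github.com/HaiyuLYU/UNSW | COMP9021-Principles-of-Programming/Assignments/Ass2/frieze.py | print_SE
-- ===== SOURCE A (Python) =====
-- from collections import defaultdict
-- import copy
--
-- def ten_to_two(num_ten):
--     num_str = bin(num_ten)
--     num_str = num_str[2:]
--     if len(num_str) == 4:
--         num_two = num_str
--     if len(num_str) == 3:
--         num_two = '0' + num_str
--     if len(num_str) == 2:
--         num_two = '00' + num_str
--     if len(num_str) == 1:
--         num_two = '000' + num_str
--     return num_two
--
-- def SE(point):
--     point_two = ten_to_two(point)
--     if point_two[-4] == '1':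
--         return True
--     return False
--
-- def print_SE(spData,height,length):
--     cpData = copy.deepcopy(spData)
--     begin = None
--     end = None
--     pse = defaultdict(list)
--     ii = 0
--     for i in range(height + 1):
--         for j in range(length + 1):
--             m = i
--             n = j
--             if begin == None:
--                 if SE(cpData[i][j]):
--                     begin = (j, i)
--                     end = (j + 1, i + 1)
--                     cpData[i][j] = 0
--                     while True:
--                         i += 1
--                         j += 1
--                         if SE(cpData[i][j]):
--                             end = (j + 1, i + 1)
--                             cpData[i][j] = 0
--                         else:
--                             break
--             i = m
--             j = n
--             if begin != None and end != None:
--                 pse[ii].append(begin)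
--                 pse[ii].append(end)
--                 begin = None
--                 end = None
--                 ii += 1
--     return pse
-- ===== SOURCE B (Python) =====
-- from collections import defaultdict
--
-- def ten_to_two(num_ten):
--     num_str = bin(num_ten)
--     num_str = num_str[2:]
--     if len(num_str) == 4:
--         num_two = num_str
--     if len(num_str) == 3:
--         num_two = '0' + num_str
--     if len(num_str) == 2:
--         num_two = '00' + num_str
--     if len(num_str) == 1:
--         num_two = '000' + num_str
--     return num_two
--
-- def SE(point):
--     point_two = ten_to_two(point)
--     if point_two[-4] == '1':
--         return True
--     return False
--
-- def print_SE(spData, height, length):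
--     # A cell starts a SE-run iff it is SE and its diagonal predecessor is not;
--     # from each start a read-only diagonal walk finds the end. No copy, no mutation.
--     pse = defaultdict(list)
--     ii = 0
--     for i in range(height + 1):
--         for j in range(length + 1):
--             if SE(spData[i][j]) and not (i > 0 and j > 0 and SE(spData[i - 1][j - 1])):
--                 di, dj = i + 1, j + 1
--                 while SE(spData[di][dj]):
--                     di += 1
--                     dj += 1
--                 pse[ii].append((j, i))
--                 pse[ii].append((dj, di))
--                 ii += 1
--     return pse
-- ===== Notes on version B (the rewrite author's own statement) =====
-- stated objective: simpler
-- what changed: Replaces A's deepcopy + in-place zeroing state machine (begin/end/m/n bookkeeping over a mutated grid) with a pure two-test scan: a cell starts a run iff it is SE and its diagonal predecessor is not, then a read-only diagonal walk finds the run's end.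
import Mathlib
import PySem

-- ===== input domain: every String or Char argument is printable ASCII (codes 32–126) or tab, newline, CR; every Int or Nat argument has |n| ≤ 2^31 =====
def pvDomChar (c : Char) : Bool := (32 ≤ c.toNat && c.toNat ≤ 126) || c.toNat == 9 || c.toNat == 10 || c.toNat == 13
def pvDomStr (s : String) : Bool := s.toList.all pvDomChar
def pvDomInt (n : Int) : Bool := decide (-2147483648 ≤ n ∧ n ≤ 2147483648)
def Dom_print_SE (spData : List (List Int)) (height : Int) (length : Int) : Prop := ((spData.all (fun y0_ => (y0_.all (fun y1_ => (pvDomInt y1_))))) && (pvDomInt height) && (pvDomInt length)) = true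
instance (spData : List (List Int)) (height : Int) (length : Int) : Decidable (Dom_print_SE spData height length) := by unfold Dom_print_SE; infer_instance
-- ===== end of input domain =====

-- B replaces A's deepcopy + in-place zeroing state machine by a pure predecessor-based
-- start detection with a read-only diagonal walk (objective: simpler; same return value).

-- ===== PORT A =====
-- bin(num)[2:] : binary digits; a negative num keeps the 'b' of '-0b…' after [2:], exactly as in Python
def pyBin (num : Int) : List Char :=
  if num < 0 then 'b' :: Nat.toDigits 2 num.natAbs else Nat.toDigits 2 num.natAbs

-- the four 'if's of A have mutually exclusive conditions, so the chain below is the same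
-- assignment; the final arm is Python's UnboundLocalError (excluded by Pre_), we return []
def ten_to_two (num_ten : Int) : List Char :=
  let num_str := pyBin num_ten
  if num_str.length = 4 then num_str
  else if num_str.length = 3 then '0' :: num_str
  else if num_str.length = 2 then '0' :: '0' :: num_str
  else if num_str.length = 1 then '0' :: '0' :: '0' :: num_str
  else []

def SE (point : Int) : Bool :=
  let point_two := ten_to_two point
  if (PySem.List.pyGet? point_two (-4)).getD ' ' = '1' then true else false

-- grid[i][j]; the defaults are Python's IndexError, excluded by Pre_
def cell (g : List (List Int)) (i j : Int) : Int :=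
  PySem.List.pyGetD (PySem.List.pyGetD g i []) j 0

-- grid[i][j] = 0
def zeroCell (g : List (List Int)) (i j : Int) : List (List Int) :=
  PySem.List.pySetD g i (PySem.List.pySetD (PySem.List.pyGetD g i []) j 0)

-- A's 'while True' walk: under Pre_ it always breaks before the fuel (g.length + 1) runs out
def walkA : Nat → List (List Int) → Int → Int → Int × Int → List (List Int) × (Int × Int)
  | 0, cp, _, _, e => (cp, e)
  | f+1, cp, i, j, e =>
    let i' := i + 1
    let j' := j + 1
    if SE (cell cp i' j') then
      walkA f (zeroCell cp i' j') i' j' (j' + 1, i' + 1)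
    else (cp, e)

-- one inner-loop body of A ('m = i; n = j' restore is implicit: the walk has its own variables)
def bodyA (s : List (List Int) × Option (Int × Int) × Option (Int × Int) × PySem.Dict Int (List (Int × Int)) × Int)
    (i j : Int) : List (List Int) × Option (Int × Int) × Option (Int × Int) × PySem.Dict Int (List (Int × Int)) × Int :=
  let (cp, b, e, pse, ii) := s
  let (cp, b, e) :=
    if b = none then
      if SE (cell cp i j) then
        let b' := some (j, i)
        let e' := (j + 1, i + 1)
        let cp' := zeroCell cp i j
        let r := walkA (cp'.length + 1) cp' i j e'
        (r.1, b', some r.2)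
      else (cp, b, e)
    else (cp, b, e)
  match b, e with
  | some bg, some en =>
    let pse := pse.insert ii (pse.getD ii [] ++ [bg])
    let pse := pse.insert ii (pse.getD ii [] ++ [en])
    (cp, none, none, pse, ii + 1)
  | _, _ => (cp, b, e, pse, ii)

def print_SE (spData : List (List Int)) (height : Int) (length : Int) : List (Int × List (Int × Int)) :=
  -- cpData = deepcopy(spData): Lean lists are values, the updates in bodyA build new lists
  let init : List (List Int) × Option (Int × Int) × Option (Int × Int) × PySem.Dict Int (List (Int × Int)) × Int :=
    (spData, none, none, PySem.Dict.empty, 0)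
  let fin := (PySem.List.pyRange 0 (height + 1) 1).foldl
    (fun s i => (PySem.List.pyRange 0 (length + 1) 1).foldl (fun s j => bodyA s i j) s) init
  fin.2.2.2.1.items

-- ===== PORT B =====
-- B's read-only diagonal walk; fuel g.length + 1 never runs out under Pre_
def walkB : Nat → List (List Int) → Int → Int → Int × Int
  | 0, _, di, dj => (dj, di)
  | f+1, g, di, dj =>
    if SE (cell g di dj) then walkB f g (di + 1) (dj + 1)
    else (dj, di)

def bodyB (g : List (List Int)) (s : PySem.Dict Int (List (Int × Int)) × Int) (i j : Int) :
    PySem.Dict Int (List (Int × Int)) × Int :=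
  let (pse, ii) := s
  if SE (cell g i j) && !(decide (0 < i) && decide (0 < j) && SE (cell g (i - 1) (j - 1))) then
    let en := walkB (g.length + 1) g (i + 1) (j + 1)
    let pse := pse.insert ii (pse.getD ii [] ++ [(j, i)])
    let pse := pse.insert ii (pse.getD ii [] ++ [en])
    (pse, ii + 1)
  else s

def print_SE_alt (spData : List (List Int)) (height : Int) (length : Int) : List (Int × List (Int × Int)) :=
  let fin := (PySem.List.pyRange 0 (height + 1) 1).foldl
    (fun s i => (PySem.List.pyRange 0 (length + 1) 1).foldl (fun s j => bodyB spData s i j) s)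
    ((PySem.Dict.empty : PySem.Dict Int (List (Int × Int))), (0 : Int))
  fin.1.items

-- ===== PRECONDITION & SPEC =====
-- cell (a,b) exists in the grid and its value is in the range SE can decode
def validB (g : List (List Int)) (a b : Int) : Bool :=
  decide (a < (g.length : Int)) && decide (b < (((g.getD a.toNat []) : List Int).length : Int)) &&
  decide (-7 ≤ cell g a b) && decide (cell g a b ≤ 15)

-- Pre_ excludes exactly the inputs on which the Python A raises: a missing row or column
-- in the scan region (IndexError), a scanned value outside [-7, 15] (UnboundLocalError in
-- ten_to_two), or a diagonal SE-run whose walk steps onto a missing or out-of-range cell.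
def Pre_print_SE (spData : List (List Int)) (height : Int) (length : Int) : Prop :=
  height < 0 ∨ length < 0 ∨
  (height + 1 ≤ (spData.length : Int) ∧
   (∀ i < (height + 1).toNat, length + 1 ≤ (((spData.getD i []) : List Int).length : Int)) ∧
   (∀ i < (height + 1).toNat, ∀ j < (length + 1).toNat,
      -7 ≤ ((spData.getD i []) : List Int).getD j 0 ∧
      ((spData.getD i []) : List Int).getD j 0 ≤ 15) ∧
   (∀ i < (height + 1).toNat, ∀ j < (length + 1).toNat, ∀ t < spData.length,
      (∀ s : Nat, s ≤ t → SE (cell spData ((i : Int) + s) ((j : Int) + s)) = true) →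
      validB spData ((i : Int) + t + 1) ((j : Int) + t + 1) = true))

instance (spData : List (List Int)) (height : Int) (length : Int) : Decidable (Pre_print_SE spData height length) := by
  unfold Pre_print_SE; infer_instance

def pvWitness_print_SE : List (List Int) × Int × Int := ([[8, 0], [0, 0]], 1, 1)

def Spec_print_SE (spData : List (List Int)) (height : Int) (length : Int) (out : List (Int × List (Int × Int))) : Prop := out = print_SE_alt spData height length
instance (spData : List (List Int)) (height : Int) (length : Int) (out : List (Int × List (Int × Int))) : Decidable (Spec_print_SE spData height length out) := by unfold Spec_print_SE; infer_instance

-- ===== CLAIM (what is proved, stated in full; the proofs are below) =====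
def Claim_equal_print_SE : Prop := ∀ (spData : List (List Int)) (height : Int) (length : Int), Dom_print_SE spData height length → Pre_print_SE spData height length → Spec_print_SE spData height length (print_SE spData height length)

-- ===== LEMMAS AND PROOFS =====

-- row-major "strictly before (p,q)"
def rmLtB (s1 s2 p q : Int) : Bool := decide (s1 < p) || (decide (s1 = p) && decide (s2 < q))

-- "inside the scan region" test for a chain start (coordinates are nonnegative anyway)
def inRegB (H L : Int) (x : Int × Int) : Bool := decide (x.1 ≤ H) && decide (x.2 ≤ L)

-- topmost cell of the maximal SE-diagonal chain through (i,j)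
def startOf (g : List (List Int)) (i j : Int) : Int × Int :=
  if h : 0 < i ∧ 0 < j ∧ SE (cell g (i - 1) (j - 1)) = true then startOf g (i - 1) (j - 1)
  else (i, j)
termination_by i.toNat
decreasing_by omega

def ShapeEq (cp g : List (List Int)) : Prop :=
  cp.length = g.length ∧ ∀ k : Nat, (cp.getD k []).length = (g.getD k []).length

-- a cell of cp is zeroed iff it is SE in g and the start of its chain lies in the scan
-- region and is row-major before the scan position (p,q)
def CpInv (g : List (List Int)) (H L p q : Int) (cp : List (List Int)) : Prop :=
  ∀ a b : Int, 0 ≤ a → 0 ≤ b →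
    cell cp a b =
      if SE (cell g a b) && (inRegB H L (startOf g a b) &&
          rmLtB (startOf g a b).1 (startOf g a b).2 p q) then 0
      else cell g a b

lemma SE_zero : SE 0 = false := by decide

lemma getD_oob {α : Type} (l : List α) (n : Nat) (d : α) (h : l.length ≤ n) :
    l.getD n d = d := by
  rw [List.getD_eq_getElem?_getD, List.getElem?_eq_none h]; rfl

lemma pyGetD_toNat {α : Type} (xs : List α) (i : Int) (d : α) (h : 0 ≤ i) :
    PySem.List.pyGetD xs i d = xs.getD i.toNat d := by
  have hi : i = ((i.toNat : Nat) : Int) := by omega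
  rw [hi, PySem.List.pyGetD_natCast]; congr 1

lemma cell_eq (g : List (List Int)) (a b : Int) (ha : 0 ≤ a) (hb : 0 ≤ b) :
    cell g a b = (g.getD a.toNat []).getD b.toNat 0 := by
  unfold cell; rw [pyGetD_toNat _ _ _ ha, pyGetD_toNat _ _ _ hb]

-- in Lean an out-of-bounds read is the default 0, and SE 0 = false; so an SE cell exists
lemma bounds_of_SE (g : List (List Int)) (a b : Int) (ha : 0 ≤ a) (hb : 0 ≤ b)
    (h : SE (cell g a b) = true) :
    a < (g.length : Int) ∧ b < (((g.getD a.toNat []) : List Int).length : Int) := by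
  rw [cell_eq _ _ _ ha hb] at h
  by_cases h1 : a < (g.length : Int)
  · refine ⟨h1, ?_⟩
    by_contra h2
    rw [getD_oob _ _ _ (by omega)] at h
    exact absurd h (by rw [SE_zero]; simp)
  · exfalso
    rw [getD_oob g a.toNat [] (by omega)] at h
    rw [getD_oob ([] : List Int) b.toNat 0 (by simp)] at h
    exact absurd h (by rw [SE_zero]; simp)

lemma pySetD_toNat {α : Type} (xs : List α) (i : Int) (v : α) (h0 : 0 ≤ i)
    (h1 : i < (xs.length : Int)) :
    PySem.List.pySetD xs i v = xs.set i.toNat v := by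
  have hi : i = ((i.toNat : Nat) : Int) := by omega
  rw [hi, PySem.List.pySetD, PySem.List.pySet?_natCast _ _ _ (by omega), Option.getD_some]; congr 1

lemma shape_refl (g : List (List Int)) : ShapeEq g g := ⟨rfl, fun _ => rfl⟩

lemma shape_zeroCell (cp : List (List Int)) (x y : Int) (hx0 : 0 ≤ x)
    (hx1 : x < (cp.length : Int)) (hy0 : 0 ≤ y)
    (hy1 : y < ((cp.getD x.toNat [] : List Int).length : Int)) (g : List (List Int))
    (hsh : ShapeEq cp g) : ShapeEq (zeroCell cp x y) g := by
  unfold zeroCell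
  rw [pyGetD_toNat _ _ _ hx0, pySetD_toNat _ _ _ hy0 hy1,
    pySetD_toNat _ _ _ hx0 (by simpa using hx1)]
  constructor
  · simpa using hsh.1
  · intro k
    by_cases hk : k = x.toNat
    · subst hk
      rw [List.getD_eq_getElem?_getD, List.getElem?_set_self (by omega)]
      simpa using hsh.2 x.toNat
    · rw [List.getD_eq_getElem?_getD, List.getElem?_set_ne (by omega)]
      rw [← List.getD_eq_getElem?_getD]
      exact hsh.2 k

lemma getD_set {α : Type} (l : List α) (i : Nat) (v d : α) (k : Nat) (hi : i < l.length) :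
    (l.set i v).getD k d = if k = i then v else l.getD k d := by
  by_cases hk : k = i
  · subst hk
    rw [if_pos rfl, List.getD_eq_getElem?_getD, List.getElem?_set_self hi, Option.getD_some]
  · rw [if_neg hk, List.getD_eq_getElem?_getD, List.getElem?_set_ne (by omega),
      ← List.getD_eq_getElem?_getD]

lemma cell_zeroCell (cp : List (List Int)) (x y a b : Int) (hx0 : 0 ≤ x)
    (hx1 : x < (cp.length : Int)) (hy0 : 0 ≤ y)
    (hy1 : y < ((cp.getD x.toNat [] : List Int).length : Int))
    (ha : 0 ≤ a) (hb : 0 ≤ b) :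
    cell (zeroCell cp x y) a b = if a = x ∧ b = y then 0 else cell cp a b := by
  unfold zeroCell
  rw [pyGetD_toNat _ _ _ hx0, pySetD_toNat _ _ _ hy0 hy1,
    pySetD_toNat _ _ _ hx0 (by simpa using hx1)]
  rw [cell_eq _ _ _ ha hb, cell_eq _ _ _ ha hb,
    getD_set _ _ _ _ _ (by omega)]
  by_cases hax : a = x
  · rw [if_pos (by omega), getD_set _ _ _ _ _ (by omega)]
    by_cases hby : b = y
    · rw [if_pos (by omega), if_pos ⟨hax, hby⟩]
    · rw [if_neg (by omega), if_neg (by tauto)]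
      subst hax; rfl
  · rw [if_neg (by omega), if_neg (by tauto)]

lemma startOf_pred (g : List (List Int)) (i j : Int)
    (h : 0 < i ∧ 0 < j ∧ SE (cell g (i - 1) (j - 1)) = true) :
    startOf g i j = startOf g (i - 1) (j - 1) := by
  rw [startOf]; exact dif_pos h

lemma startOf_fix (g : List (List Int)) (i j : Int)
    (h : ¬(0 < i ∧ 0 < j ∧ SE (cell g (i - 1) (j - 1)) = true)) :
    startOf g i j = (i, j) := by
  rw [startOf]; exact dif_neg h

lemma startOf_spec (g : List (List Int)) (a b : Int) (ha : 0 ≤ a) (hb : 0 ≤ b)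
    (hSE : SE (cell g a b) = true) :
    ∃ k : Nat, startOf g a b = (a - k, b - k) ∧ (k : Int) ≤ a ∧ (k : Int) ≤ b ∧
      (∀ s : Nat, s ≤ k → SE (cell g (a - s) (b - s)) = true) ∧
      ¬(0 < a - k ∧ 0 < b - k ∧ SE (cell g (a - k - 1) (b - k - 1)) = true) := by
  induction a, b using startOf.induct g with
  | case1 i j h ih =>
    obtain ⟨k, hk1, hk2, hk3, hk4, hk5⟩ := ih (by omega) (by omega) h.2.2
    refine ⟨k + 1, ?_, by omega, by omega, ?_, ?_⟩
    · rw [startOf_pred g i j h, hk1]; simp only [Prod.mk.injEq]; omega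
    · intro s hs
      match s with
      | 0 => simpa using hSE
      | s + 1 =>
        have := hk4 s (by omega)
        have e1 : i - (s + 1 : Nat) = i - 1 - s := by push_cast; ring
        have e2 : j - (s + 1 : Nat) = j - 1 - s := by push_cast; ring
        rw [e1, e2]; exact this
    · have e1 : i - ((k + 1 : Nat) : Int) = i - 1 - k := by push_cast; ring
      have e2 : j - ((k + 1 : Nat) : Int) = j - 1 - k := by push_cast; ring
      rw [e1, e2]; exact hk5
  | case2 i j h =>
    refine ⟨0, by simpa using startOf_fix g i j h, by omega, by omega, ?_, by simpa using h⟩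
    intro s hs
    interval_cases s
    simpa using hSE

-- every cell of a maximal chain below an actual start has that start as its startOf
lemma chain_down (g : List (List Int)) (p q : Int) (hp : 0 ≤ p) (hq : 0 ≤ q)
    (hstart : ¬(0 < p ∧ 0 < q ∧ SE (cell g (p - 1) (q - 1)) = true)) :
    ∀ t : Nat, (∀ s : Nat, s ≤ t → SE (cell g (p + s) (q + s)) = true) →
      startOf g (p + t) (q + t) = (p, q) := by
  intro t
  induction t with
  | zero => intro _; simpa using startOf_fix g p q hstart
  | succ t ih =>
    intro hchain
    have hpred : 0 < p + ((t + 1 : Nat) : Int) ∧ 0 < q + ((t + 1 : Nat) : Int) ∧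
        SE (cell g (p + ((t + 1 : Nat) : Int) - 1) (q + ((t + 1 : Nat) : Int) - 1)) = true := by
      refine ⟨by omega, by omega, ?_⟩
      have := hchain t (by omega)
      have e1 : p + ((t + 1 : Nat) : Int) - 1 = p + t := by push_cast; ring
      have e2 : q + ((t + 1 : Nat) : Int) - 1 = q + t := by push_cast; ring
      rw [e1, e2]; exact this
    rw [startOf_pred g _ _ hpred]
    have e1 : p + ((t + 1 : Nat) : Int) - 1 = p + t := by push_cast; ring
    have e2 : q + ((t + 1 : Nat) : Int) - 1 = q + t := by push_cast; ring
    rw [e1, e2]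
    exact ih (fun s hs => hchain s (by omega))

-- a chain from startOf up to the cell
lemma chain_up (g : List (List Int)) (a b p q : Int) (ha : 0 ≤ a) (hb : 0 ≤ b)
    (hSE : SE (cell g a b) = true) (h : startOf g a b = (p, q)) :
    ∃ k : Nat, a = p + k ∧ b = q + k ∧
      (∀ s : Nat, s ≤ k → SE (cell g (p + s) (q + s)) = true) ∧
      ¬(0 < p ∧ 0 < q ∧ SE (cell g (p - 1) (q - 1)) = true) := by
  obtain ⟨k, hk1, hk2, hk3, hk4, hk5⟩ := startOf_spec g a b ha hb hSE
  rw [h] at hk1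
  obtain ⟨e1, e2⟩ := Prod.mk.injEq .. ▸ hk1
  refine ⟨k, by omega, by omega, ?_, ?_⟩
  · intro s hs
    have := hk4 (k - s) (by omega)
    have e3 : p + (s : Int) = a - ((k - s : Nat) : Int) := by
      have : ((k - s : Nat) : Int) = (k : Int) - s := by omega
      omega
    have e4 : q + (s : Int) = b - ((k - s : Nat) : Int) := by
      have : ((k - s : Nat) : Int) = (k : Int) - s := by omega
      omega
    rw [e3, e4]; exact this
  · have e3 : p = a - k := by omega
    have e4 : q = b - k := by omega
    rw [e3, e4]; exact hk5

lemma SE_startOf (g : List (List Int)) (a b : Int) (ha : 0 ≤ a) (hb : 0 ≤ b)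
    (hSE : SE (cell g a b) = true) :
    SE (cell g (startOf g a b).1 (startOf g a b).2) = true := by
  obtain ⟨k, hk1, hk2, hk3, hk4, _⟩ := startOf_spec g a b ha hb hSE
  rw [hk1]; exact hk4 k (by omega)

lemma startOf_nonneg (g : List (List Int)) (a b : Int) (ha : 0 ≤ a) (hb : 0 ≤ b)
    (hSE : SE (cell g a b) = true) :
    0 ≤ (startOf g a b).1 ∧ (startOf g a b).1 ≤ a ∧ 0 ≤ (startOf g a b).2 ∧
      (startOf g a b).2 ≤ b := by
  obtain ⟨k, hk1, hk2, hk3, _, _⟩ := startOf_spec g a b ha hb hSE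
  rw [hk1]; constructor <;> simp <;> omega

-- rmLtB arithmetic
lemma rmLtB_succ (s1 s2 p q : Int) :
    rmLtB s1 s2 p (q + 1) = (rmLtB s1 s2 p q || (decide (s1 = p) && decide (s2 = q))) := by
  rw [Bool.eq_iff_iff]; simp [rmLtB]; omega

lemma rmLtB_rowwrap (s1 s2 p L : Int) (h0 : 0 ≤ s2) (h1 : s2 ≤ L) :
    rmLtB s1 s2 p (L + 1) = rmLtB s1 s2 (p + 1) 0 := by
  rw [Bool.eq_iff_iff]; simp [rmLtB]; omega

lemma rmLtB_zero (s1 s2 : Int) (h1 : 0 ≤ s1) (h2 : 0 ≤ s2) : rmLtB s1 s2 0 0 = false := by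
  simp [rmLtB]; omega

lemma rmLtB_self (p q : Int) : rmLtB p q p q = false := by simp [rmLtB]

lemma decide_pair_eq (x : Int × Int) (p q : Int) :
    decide (x = (p, q)) = (decide (x.1 = p) && decide (x.2 = q)) := by
  rcases x with ⟨a, b⟩; simp

lemma walkB_spec (g : List (List Int)) (p q : Int) (hp0 : 0 ≤ p) (hq0 : 0 ≤ q) :
    ∀ (f t : Nat), (∀ s : Nat, s ≤ t → SE (cell g (p + s) (q + s)) = true) →
      ((g.length : Int) ≤ p + t + f) →
      ∃ T : Nat, t ≤ T ∧ (∀ s : Nat, s ≤ T → SE (cell g (p + s) (q + s)) = true) ∧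
        SE (cell g (p + T + 1) (q + T + 1)) = false ∧
        walkB f g (p + t + 1) (q + t + 1) = (q + T + 1, p + T + 1) := by
  intro f
  induction f with
  | zero =>
    intro t hchain hf
    have := (bounds_of_SE g (p + t) (q + t) (by omega) (by omega) (hchain t (le_refl _))).1
    omega
  | succ f ih =>
    intro t hchain hf
    rw [walkB]
    by_cases hse : SE (cell g (p + t + 1) (q + t + 1)) = true
    · rw [if_pos hse]
      have hchain' : ∀ s : Nat, s ≤ t + 1 → SE (cell g (p + s) (q + s)) = true := by
        intro s hs
        rcases Nat.lt_or_ge s (t + 1) with h | h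
        · exact hchain s (by omega)
        · have hs1 : s = t + 1 := by omega
          subst hs1; push_cast; convert hse using 3 <;> ring
      obtain ⟨T, hT1, hT2, hT3, hT4⟩ := ih (t + 1) hchain' (by push_cast; omega)
      refine ⟨T, by omega, hT2, hT3, ?_⟩
      rw [← hT4]; congr 1 <;> push_cast <;> ring
    · rw [if_neg hse]
      exact ⟨t, le_refl _, hchain, by simpa using hse, rfl⟩

lemma walkA_spec (g : List (List Int)) (H L : Int) (p q : Int)
    (hp0 : 0 ≤ p) (hq0 : 0 ≤ q)
    (hSEpq : SE (cell g p q) = true)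
    (hstart : ¬(0 < p ∧ 0 < q ∧ SE (cell g (p - 1) (q - 1)) = true)) :
    ∀ (f t : Nat) (cp : List (List Int)) (e : Int × Int), ShapeEq cp g →
      (∀ s : Nat, s ≤ t → SE (cell g (p + s) (q + s)) = true) →
      (∀ a b : Int, 0 ≤ a → 0 ≤ b →
        cell cp a b =
          if SE (cell g a b) && ((inRegB H L (startOf g a b) &&
              rmLtB (startOf g a b).1 (startOf g a b).2 p q)
              || (decide (startOf g a b = (p, q)) && decide (a ≤ p + t))) then 0
          else cell g a b) →
      ((g.length : Int) ≤ p + t + f) →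
      (e = (q + t + 1, p + t + 1)) →
      ∃ T : Nat, t ≤ T ∧ (∀ s : Nat, s ≤ T → SE (cell g (p + s) (q + s)) = true) ∧
        SE (cell g (p + T + 1) (q + T + 1)) = false ∧
        (walkA f cp (p + t) (q + t) e).2 = (q + T + 1, p + T + 1) ∧
        ShapeEq (walkA f cp (p + t) (q + t) e).1 g ∧
        (∀ a b : Int, 0 ≤ a → 0 ≤ b →
          cell (walkA f cp (p + t) (q + t) e).1 a b =
            if SE (cell g a b) && ((inRegB H L (startOf g a b) &&
                rmLtB (startOf g a b).1 (startOf g a b).2 p q)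
                || decide (startOf g a b = (p, q))) then 0
            else cell g a b) := by
  intro f
  induction f with
  | zero =>
    intro t cp e hsh hchain hinv hf he
    have := (bounds_of_SE g (p + t) (q + t) (by omega) (by omega) (hchain t (le_refl _))).1
    omega
  | succ f ih =>
    intro t cp e hsh hchain hinv hf he
    -- the walk's test reads the original value at the next diagonal cell
    have hcellnext : cell cp (p + t + 1) (q + t + 1) = cell g (p + t + 1) (q + t + 1) := by
      rw [hinv _ _ (by omega) (by omega)]
      by_cases hse : SE (cell g (p + t + 1) (q + t + 1)) = true
      · have hchain' : ∀ s : Nat, s ≤ t + 1 → SE (cell g (p + s) (q + s)) = true := by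
          intro s hs
          rcases Nat.lt_or_ge s (t + 1) with h | h
          · exact hchain s (by omega)
          · have hs1 : s = t + 1 := by omega
            subst hs1; push_cast; convert hse using 3 <;> ring
        have hst : startOf g (p + t + 1) (q + t + 1) = (p, q) := by
          have := chain_down g p q hp0 hq0 hstart (t + 1) hchain'
          rw [← this]; congr 1 <;> push_cast <;> ring
        rw [hst]
        simp [rmLtB_self]
      · simp [hse]
    subst he
    rw [walkA]
    by_cases hse : SE (cell g (p + t + 1) (q + t + 1)) = true
    · have htest : SE (cell cp (p + t + 1) (q + t + 1)) = true := by rw [hcellnext]; exact hse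
      rw [if_pos htest]
      have hchain' : ∀ s : Nat, s ≤ t + 1 → SE (cell g (p + s) (q + s)) = true := by
        intro s hs
        rcases Nat.lt_or_ge s (t + 1) with h | h
        · exact hchain s (by omega)
        · have hs1 : s = t + 1 := by omega
          subst hs1; push_cast; convert hse using 3 <;> ring
      have hst : startOf g (p + t + 1) (q + t + 1) = (p, q) := by
        have := chain_down g p q hp0 hq0 hstart (t + 1) hchain'
        rw [← this]; congr 1 <;> push_cast <;> ring
      -- in-range facts for zeroCell at the next diagonal cell (an SE cell exists)
      have hbg := bounds_of_SE g (p + t + 1) (q + t + 1) (by omega) (by omega) hse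
      have hglen : (cp.length : Int) = (g.length : Int) := by
        exact_mod_cast congrArg Nat.cast hsh.1
      have hx1 : p + t + 1 < (cp.length : Int) := by omega
      have hrowcp := hsh.2 (p + t + 1).toNat
      have hy1 : q + t + 1 < ((cp.getD (p + t + 1).toNat [] : List Int).length : Int) := by
        rw [hrowcp]; exact hbg.2
      have hsh1 : ShapeEq (zeroCell cp (p + t + 1) (q + t + 1)) g :=
        shape_zeroCell cp _ _ (by omega) hx1 (by omega) hy1 g hsh
      have hinv1 : ∀ a b : Int, 0 ≤ a → 0 ≤ b →
          cell (zeroCell cp (p + t + 1) (q + t + 1)) a b =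
            if SE (cell g a b) && ((inRegB H L (startOf g a b) &&
                rmLtB (startOf g a b).1 (startOf g a b).2 p q)
                || (decide (startOf g a b = (p, q)) && decide (a ≤ p + ((t + 1 : Nat) : Int)))) then 0
            else cell g a b := by
        intro a b ha0 hb0
        rw [cell_zeroCell cp _ _ a b (by omega) hx1 (by omega) hy1 ha0 hb0]
        by_cases hab : a = p + t + 1 ∧ b = q + t + 1
        · rw [if_pos hab]
          obtain ⟨ea, eb⟩ := hab; subst ea; subst eb
          rw [hst]
          simp [hse]
        · rw [if_neg hab, hinv a b ha0 hb0]
          by_cases hseab : SE (cell g a b) = true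
          · by_cases hstab : startOf g a b = (p, q)
            · obtain ⟨k, ek1, ek2, _, _⟩ := chain_up g a b p q ha0 hb0 hseab hstab
              have hne : a ≠ p + t + 1 := by
                intro hh; exact hab ⟨hh, by omega⟩
              have hdec : decide (a ≤ p + (t : Int)) = decide (a ≤ p + ((t + 1 : Nat) : Int)) := by
                rw [Bool.eq_iff_iff]; simp only [decide_eq_true_eq]; push_cast; omega
              rw [hdec]
            · simp [hstab]
          · simp [hseab]
      obtain ⟨T, hT1, hT2, hT3, hT4, hT5, hT6⟩ :=
        ih (t + 1) (zeroCell cp (p + t + 1) (q + t + 1))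
          (q + ((t + 1 : Nat) : Int) + 1, p + ((t + 1 : Nat) : Int) + 1) hsh1 hchain' hinv1
          (by push_cast; omega) rfl
      have e1 : p + ((t + 1 : Nat) : Int) = p + t + 1 := by push_cast; ring
      have e2 : q + ((t + 1 : Nat) : Int) = q + t + 1 := by push_cast; ring
      rw [e1, e2] at hT4 hT5 hT6
      exact ⟨T, by omega, hT2, hT3, hT4, hT5, hT6⟩
    · have htest : ¬ SE (cell cp (p + t + 1) (q + t + 1)) = true := by rw [hcellnext]; exact hse
      rw [if_neg htest]
      refine ⟨t, le_refl _, hchain, by simpa using hse, rfl, hsh, ?_⟩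
      intro a b ha0 hb0
      rw [hinv a b ha0 hb0]
      by_cases hseab : SE (cell g a b) = true
      · by_cases hstab : startOf g a b = (p, q)
        · obtain ⟨k, ek1, ek2, ek3, _⟩ := chain_up g a b p q ha0 hb0 hseab hstab
          have hkt : k ≤ t := by
            by_contra hkt
            have hch := ek3 (t + 1) (by omega)
            have e1 : p + ((t + 1 : Nat) : Int) = p + t + 1 := by push_cast; ring
            have e2 : q + ((t + 1 : Nat) : Int) = q + t + 1 := by push_cast; ring
            rw [e1, e2] at hch
            exact hse hch
          have hdec : decide (a ≤ p + (t : Int)) = true := by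
            simp only [decide_eq_true_eq]; omega
          rw [hdec]
          simp [hstab]
        · simp [hstab]
      · simp [hseab]

lemma bodyA_eval_false (cp : List (List Int)) (pse : PySem.Dict Int (List (Int × Int)))
    (ii p q : Int) (h : SE (cell cp p q) = false) :
    bodyA (cp, none, none, pse, ii) p q = (cp, none, none, pse, ii) := by
  simp [bodyA, h]

lemma bodyA_eval_true (cp : List (List Int)) (pse : PySem.Dict Int (List (Int × Int)))
    (ii p q : Int) (h : SE (cell cp p q) = true) :
    bodyA (cp, none, none, pse, ii) p q =
      ((walkA ((zeroCell cp p q).length + 1) (zeroCell cp p q) p q (q + 1, p + 1)).1, none, none,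
       (pse.insert ii (pse.getD ii [] ++ [(q, p)])).insert ii
         ((pse.insert ii (pse.getD ii [] ++ [(q, p)])).getD ii [] ++
           [(walkA ((zeroCell cp p q).length + 1) (zeroCell cp p q) p q (q + 1, p + 1)).2]),
       ii + 1) := by
  simp [bodyA, h]

lemma bodyB_eval_false (g : List (List Int)) (pse : PySem.Dict Int (List (Int × Int)))
    (ii p q : Int)
    (h : (SE (cell g p q) && !(decide (0 < p) && decide (0 < q) && SE (cell g (p - 1) (q - 1)))) = false) :
    bodyB g (pse, ii) p q = (pse, ii) := by
  simp only [bodyB, h, Bool.false_eq_true, if_false]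

lemma bodyB_eval_true (g : List (List Int)) (pse : PySem.Dict Int (List (Int × Int)))
    (ii p q : Int)
    (h : (SE (cell g p q) && !(decide (0 < p) && decide (0 < q) && SE (cell g (p - 1) (q - 1)))) = true) :
    bodyB g (pse, ii) p q =
      ((pse.insert ii (pse.getD ii [] ++ [(q, p)])).insert ii
         ((pse.insert ii (pse.getD ii [] ++ [(q, p)])).getD ii [] ++
           [walkB (g.length + 1) g (p + 1) (q + 1)]), ii + 1) := by
  simp only [bodyB, h, if_true]

lemma step_lemma (g : List (List Int)) (H L : Int) (p q : Int)
    (hp0 : 0 ≤ p) (hp1 : p ≤ H) (hq0 : 0 ≤ q) (hq1 : q ≤ L)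
    (cp : List (List Int)) (pse : PySem.Dict Int (List (Int × Int))) (ii : Int)
    (hsh : ShapeEq cp g) (hinv : CpInv g H L p q cp) :
    ∃ cp', bodyA (cp, none, none, pse, ii) p q =
        (cp', none, none, (bodyB g (pse, ii) p q).1, (bodyB g (pse, ii) p q).2) ∧
      ShapeEq cp' g ∧ CpInv g H L p (q + 1) cp' := by
  have hpq := hinv p q hp0 hq0
  by_cases hseg : SE (cell g p q) = true
  · by_cases hpred : 0 < p ∧ 0 < q ∧ SE (cell g (p - 1) (q - 1)) = true
    · -- SE cell with an SE predecessor: A sees a zeroed cell, B's start test fails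
      have hsp := startOf_nonneg g (p - 1) (q - 1) (by omega) (by omega) hpred.2.2
      have hstp : startOf g p q = startOf g (p - 1) (q - 1) := startOf_pred g p q hpred
      have hrm : rmLtB (startOf g p q).1 (startOf g p q).2 p q = true := by
        rw [hstp]; simp [rmLtB]; omega
      have hreg : inRegB H L (startOf g p q) = true := by
        rw [hstp]; simp [inRegB]; omega
      have hcp : cell cp p q = 0 := by rw [hpq, hseg, hrm, hreg]; simp
      have htestA : SE (cell cp p q) = false := by rw [hcp]; exact SE_zero
      have htestB : (SE (cell g p q) &&
          !(decide (0 < p) && decide (0 < q) && SE (cell g (p - 1) (q - 1)))) = false := by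
        simp [hseg, hpred.1, hpred.2.1, hpred.2.2]
      rw [bodyA_eval_false _ _ _ _ _ htestA, bodyB_eval_false _ _ _ _ _ htestB]
      refine ⟨cp, rfl, hsh, ?_⟩
      intro a b ha0 hb0
      rw [hinv a b ha0 hb0, rmLtB_succ, ← decide_pair_eq]
      by_cases hseab : SE (cell g a b) = true
      · have hstab : ¬ startOf g a b = (p, q) := by
          intro hh
          obtain ⟨_, _, _, _, hnp⟩ := chain_up g a b p q ha0 hb0 hseab hh
          exact hnp hpred
        simp [hstab]
      · simp [hseab]
    · -- a fresh start cell: both sides run the diagonal walk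
      have hstartfix : startOf g p q = (p, q) := startOf_fix g p q hpred
      have hcp : cell cp p q = cell g p q := by
        rw [hpq, hstartfix]; simp [rmLtB_self]
      have htestA : SE (cell cp p q) = true := by rw [hcp]; exact hseg
      have htestB : (SE (cell g p q) &&
          !(decide (0 < p) && decide (0 < q) && SE (cell g (p - 1) (q - 1)))) = true := by
        simp only [hseg, Bool.true_and, Bool.not_eq_true']
        by_cases h1 : 0 < p
        · by_cases h2 : 0 < q
          · have hf : SE (cell g (p - 1) (q - 1)) = false := by
              rcases Bool.eq_false_or_eq_true (SE (cell g (p - 1) (q - 1))) with h | h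
              · exact absurd ⟨h1, h2, h⟩ hpred
              · exact h
            simp [hf]
          · simp [h2]
        · simp [h1]
      rw [bodyA_eval_true _ _ _ _ _ htestA, bodyB_eval_true _ _ _ _ _ htestB]
      have hbg := bounds_of_SE g p q hp0 hq0 hseg
      have hglen : (cp.length : Int) = (g.length : Int) := by
        exact_mod_cast congrArg Nat.cast hsh.1
      have hx1 : p < (cp.length : Int) := by omega
      have hrowcp := hsh.2 p.toNat
      have hy1 : q < ((cp.getD p.toNat [] : List Int).length : Int) := by
        rw [hrowcp]; exact hbg.2
      have hsh1 : ShapeEq (zeroCell cp p q) g := shape_zeroCell cp _ _ hp0 hx1 hq0 hy1 g hsh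
      have hchain0 : ∀ s : Nat, s ≤ 0 → SE (cell g (p + s) (q + s)) = true := by
        intro s hs; interval_cases s; simpa using hseg
      have hinv1 : ∀ a b : Int, 0 ≤ a → 0 ≤ b →
          cell (zeroCell cp p q) a b =
            if SE (cell g a b) && ((inRegB H L (startOf g a b) &&
                rmLtB (startOf g a b).1 (startOf g a b).2 p q)
                || (decide (startOf g a b = (p, q)) && decide (a ≤ p + ((0 : Nat) : Int)))) then 0
            else cell g a b := by
        intro a b ha0 hb0
        rw [cell_zeroCell cp p q a b hp0 hx1 hq0 hy1 ha0 hb0]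
        by_cases hab : a = p ∧ b = q
        · rw [if_pos hab]; obtain ⟨ea, eb⟩ := hab; subst ea; subst eb
          rw [hstartfix]; simp [hseg]
        · rw [if_neg hab, hinv a b ha0 hb0]
          by_cases hseab : SE (cell g a b) = true
          · by_cases hstab : startOf g a b = (p, q)
            · obtain ⟨k, ek1, ek2, ek3, _⟩ := chain_up g a b p q ha0 hb0 hseab hstab
              have hk0 : k ≠ 0 := by
                intro hh; subst hh; exact hab ⟨by simpa using ek1, by simpa using ek2⟩
              have hdec : decide (a ≤ p + ((0 : Nat) : Int)) = false := by
                simp only [decide_eq_false_iff_not]; push_cast; omega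
              rw [hdec]; simp
            · simp [hstab]
          · simp [hseab]
      have hfuel : (g.length : Int) ≤ p + ((0 : Nat) : Int) + ((zeroCell cp p q).length + 1) := by
        have hzl : ((zeroCell cp p q).length : Int) = (g.length : Int) := by
          exact_mod_cast congrArg Nat.cast hsh1.1
        push_cast at hzl ⊢; omega
      obtain ⟨T, hT1, hT2, hT3, hT4, hT5, hT6⟩ :=
        walkA_spec g H L p q hp0 hq0 hseg hpred ((zeroCell cp p q).length + 1) 0
          (zeroCell cp p q) (q + 1, p + 1) hsh1 hchain0 hinv1 hfuel (by norm_num)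
      obtain ⟨T', hT1', hT2', hT3', hT4'⟩ :=
        walkB_spec g p q hp0 hq0 (g.length + 1) 0 hchain0 (by push_cast; omega)
      have ez : p + ((0 : Nat) : Int) = p := by norm_num
      have ez2 : q + ((0 : Nat) : Int) = q := by norm_num
      rw [ez, ez2] at hT4 hT5 hT6 hT4'
      have hTT : T = T' := by
        rcases Nat.lt_trichotomy T T' with h | h | h
        · have hch := hT2' (T + 1) (by omega)
          have e1 : p + ((T + 1 : Nat) : Int) = p + T + 1 := by push_cast; ring
          have e2 : q + ((T + 1 : Nat) : Int) = q + T + 1 := by push_cast; ring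
          rw [e1, e2, hT3] at hch; cases hch
        · exact h
        · have hch := hT2 (T' + 1) (by omega)
          have e1 : p + ((T' + 1 : Nat) : Int) = p + T' + 1 := by push_cast; ring
          have e2 : q + ((T' + 1 : Nat) : Int) = q + T' + 1 := by push_cast; ring
          rw [e1, e2, hT3'] at hch; cases hch
      subst hTT
      refine ⟨(walkA ((zeroCell cp p q).length + 1) (zeroCell cp p q) p q (q + 1, p + 1)).1,
        ?_, hT5, ?_⟩
      · rw [hT4, hT4']
      · intro a b ha0 hb0
        rw [hT6 a b ha0 hb0, rmLtB_succ, ← decide_pair_eq]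
        -- with the start (p,q) inside the region the two conditions coincide
        by_cases hstab : startOf g a b = (p, q)
        · have hreg : inRegB H L (p, q) = true := by simp [inRegB]; omega
          simp [hstab, hreg]
        · simp [hstab]
  · -- not an SE cell: both sides skip
    have hcp : cell cp p q = cell g p q := by rw [hpq]; simp [hseg]
    have htestA : SE (cell cp p q) = false := by rw [hcp]; simpa using hseg
    have htestB : (SE (cell g p q) &&
        !(decide (0 < p) && decide (0 < q) && SE (cell g (p - 1) (q - 1)))) = false := by
      simp only [Bool.and_eq_false_iff]
      left
      simpa using hseg
    rw [bodyA_eval_false _ _ _ _ _ htestA, bodyB_eval_false _ _ _ _ _ htestB]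
    refine ⟨cp, rfl, hsh, ?_⟩
    intro a b ha0 hb0
    rw [hinv a b ha0 hb0, rmLtB_succ, ← decide_pair_eq]
    by_cases hseab : SE (cell g a b) = true
    · have hstab : ¬ startOf g a b = (p, q) := by
        intro hh
        have := SE_startOf g a b ha0 hb0 hseab
        rw [hh] at this
        exact hseg this
      simp [hstab]
    · simp [hseab]

lemma CpInv_wrap (g : List (List Int)) (H L : Int) (p : Int) (cp : List (List Int))
    (h : CpInv g H L p (L + 1) cp) : CpInv g H L (p + 1) 0 cp := by
  intro a b ha0 hb0
  rw [h a b ha0 hb0]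
  by_cases hseab : SE (cell g a b) = true
  · have hsb := startOf_nonneg g a b ha0 hb0 hseab
    by_cases hreg : inRegB H L (startOf g a b) = true
    · have hL2 : (startOf g a b).2 ≤ L := by
        have := hreg; simp [inRegB] at this; omega
      rw [rmLtB_rowwrap _ _ _ _ hsb.2.2.1 hL2]
    · simp only [Bool.not_eq_true] at hreg
      rw [hreg]
      simp
  · simp [hseab]

lemma inner_loop (g : List (List Int)) (H L : Int) (p : Int)
    (hp0 : 0 ≤ p) (hp1 : p ≤ H) :
    ∀ (n : Nat) (q : Int) (cp : List (List Int)) (pse : PySem.Dict Int (List (Int × Int))) (ii : Int),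
      q = L + 1 - n → 0 ≤ q → ShapeEq cp g → CpInv g H L p q cp →
      ∃ cp', (PySem.List.pyRange q (L + 1) 1).foldl (fun s j => bodyA s p j) (cp, none, none, pse, ii)
          = (cp', none, none,
             ((PySem.List.pyRange q (L + 1) 1).foldl (fun s j => bodyB g s p j) (pse, ii)).1,
             ((PySem.List.pyRange q (L + 1) 1).foldl (fun s j => bodyB g s p j) (pse, ii)).2) ∧
        ShapeEq cp' g ∧ CpInv g H L p (L + 1) cp' := by
  intro n
  induction n with
  | zero =>
    intro q cp pse ii hq hq0 hsh hinv
    have hq1 : q = L + 1 := by omega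
    subst hq1
    rw [PySem.List.pyRange_one_eq_nil (le_refl _)]
    exact ⟨cp, rfl, hsh, hinv⟩
  | succ n ih =>
    intro q cp pse ii hq hq0 hsh hinv
    have hqL : q ≤ L := by omega
    rw [PySem.List.pyRange_one_cons (show q < L + 1 by omega), List.foldl_cons, List.foldl_cons]
    obtain ⟨cp1, heq, hsh1, hinv1⟩ :=
      step_lemma g H L p q hp0 hp1 hq0 hqL cp pse ii hsh hinv
    rw [heq]
    exact ih (q + 1) cp1 (bodyB g (pse, ii) p q).1 (bodyB g (pse, ii) p q).2
      (by omega) (by omega) hsh1 hinv1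

lemma outer_loop (g : List (List Int)) (H L : Int) (hL : 0 ≤ L) :
    ∀ (m : Nat) (p : Int) (cp : List (List Int)) (pse : PySem.Dict Int (List (Int × Int))) (ii : Int),
      p = H + 1 - m → 0 ≤ p → ShapeEq cp g → CpInv g H L p 0 cp →
      ∃ cp', (PySem.List.pyRange p (H + 1) 1).foldl
            (fun s i => (PySem.List.pyRange 0 (L + 1) 1).foldl (fun s j => bodyA s i j) s)
            (cp, none, none, pse, ii)
          = (cp', none, none,
             ((PySem.List.pyRange p (H + 1) 1).foldl
               (fun s i => (PySem.List.pyRange 0 (L + 1) 1).foldl (fun s j => bodyB g s i j) s)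
               (pse, ii)).1,
             ((PySem.List.pyRange p (H + 1) 1).foldl
               (fun s i => (PySem.List.pyRange 0 (L + 1) 1).foldl (fun s j => bodyB g s i j) s)
               (pse, ii)).2) ∧
        ShapeEq cp' g := by
  intro m
  induction m with
  | zero =>
    intro p cp pse ii hp hp0 hsh hinv
    have hp1 : p = H + 1 := by omega
    subst hp1
    rw [PySem.List.pyRange_one_eq_nil (le_refl _)]
    exact ⟨cp, rfl, hsh⟩
  | succ m ih =>
    intro p cp pse ii hp hp0 hsh hinv
    have hpH : p ≤ H := by omega
    rw [PySem.List.pyRange_one_cons (show p < H + 1 by omega), List.foldl_cons, List.foldl_cons]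
    obtain ⟨cp1, heq, hsh1, hinv1⟩ :=
      inner_loop g H L p hp0 hpH (L + 1).toNat 0 cp pse ii
        (by omega) (le_refl _) hsh hinv
    rw [heq]
    exact ih (p + 1) cp1 _ _ (by omega) (by omega) hsh1 (CpInv_wrap g H L p cp1 hinv1)

lemma main_eq (spData : List (List Int)) (height length : Int)
    (hH : 0 ≤ height) (hL : 0 ≤ length) :
    print_SE spData height length = print_SE_alt spData height length := by
  have hinv0 : CpInv spData height length 0 0 spData := by
    intro a b ha0 hb0
    by_cases hseab : SE (cell spData a b) = true
    · have hsb := startOf_nonneg spData a b ha0 hb0 hseab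
      rw [rmLtB_zero _ _ hsb.1 hsb.2.2.1]
      simp
    · simp [hseab]
  obtain ⟨cp', heq, _⟩ :=
    outer_loop spData height length hL (height + 1).toNat 0 spData PySem.Dict.empty 0
      (by omega) (le_refl _) (shape_refl spData) hinv0
  simp only [print_SE, print_SE_alt]
  rw [heq]

-- ===== VERDICT (by name: the statement is the Claim_ definition above) =====
theorem print_SE_spec : Claim_equal_print_SE := by
  unfold Claim_equal_print_SE
  intro spData height length hdom hpre
  unfold Spec_print_SE
  by_cases hh : height < 0
  · simp only [print_SE, print_SE_alt]
    rw [PySem.List.pyRange_one_eq_nil (show height + 1 ≤ 0 by omega)]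
    rfl
  · by_cases hl : length < 0
    · simp only [print_SE, print_SE_alt]
      rw [PySem.List.pyRange_one_eq_nil (show length + 1 ≤ 0 by omega)]
      simp only [List.foldl_nil, PySem.List.foldl_ignore]
    · exact main_eq spData height length (by omega) (by omega)
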